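-- pv_equiv track=rewrite | github.com/PaddlePaddle/Paddle | setup.py | filter_setup_args
-- ===== SOURCE A (Python) =====
-- def filter_setup_args(input_args):
--     cmake_and_build = True
--     only_cmake = False
--     rerun_cmake = False
--     filter_args_list = []
--     for arg in input_args:
--         if arg == 'rerun-cmake':
--             rerun_cmake = True  # delete CMakeCache.txt and rerun cmake
--             continue
--         if arg == 'only-cmake':
--             only_cmake = True  # only cmake and do not make, leave a chance for users to adjust build options
--             continue
--         if arg in ['clean', 'egg_info', 'sdist']:
--             cmake_and_build = False
--         filter_args_list.append(arg)
--     return cmake_and_build, only_cmake, rerun_cmake, filter_args_list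
-- ===== SOURCE B (Python) =====
-- def filter_setup_args(input_args):
--     rerun_cmake = 'rerun-cmake' in input_args
--     only_cmake = 'only-cmake' in input_args
--     cmake_and_build = not any(a in ('clean', 'egg_info', 'sdist') for a in input_args)
--     filter_args_list = [a for a in input_args if a not in ('rerun-cmake', 'only-cmake')]
--     return cmake_and_build, only_cmake, rerun_cmake, filter_args_list
-- ===== Notes on version B (the rewrite author's own statement) =====
-- stated objective: simpler
-- what changed: Replaces the single fused loop with mutable flag state by four independent whole-list queries: two membership tests, one any() over the clean/egg_info/sdist set, and one filtering comprehension.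
import Mathlib
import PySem

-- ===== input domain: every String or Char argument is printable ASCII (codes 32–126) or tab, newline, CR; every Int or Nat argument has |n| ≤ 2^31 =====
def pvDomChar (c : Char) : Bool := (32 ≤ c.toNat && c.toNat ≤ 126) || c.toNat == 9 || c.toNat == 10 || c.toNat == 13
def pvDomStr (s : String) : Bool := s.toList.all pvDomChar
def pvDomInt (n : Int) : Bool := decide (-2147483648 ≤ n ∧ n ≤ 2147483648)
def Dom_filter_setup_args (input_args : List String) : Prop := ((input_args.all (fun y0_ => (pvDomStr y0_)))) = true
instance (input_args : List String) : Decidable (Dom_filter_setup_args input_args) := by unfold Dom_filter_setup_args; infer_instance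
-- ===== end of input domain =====

-- B keeps the single-pass fused loop of A as four independent whole-list queries (simpler decomposition).

-- ===== PORT A =====
-- one fold over the input carrying the four mutable variables of A's loop
def pvStepA (st : Bool × Bool × Bool × List String) (arg : String) :
    Bool × Bool × Bool × List String :=
  let (cb, oc, rc, acc) := st
  if arg = "rerun-cmake" then (cb, oc, true, acc)
  else if arg = "only-cmake" then (cb, true, rc, acc)
  else if arg = "clean" ∨ arg = "egg_info" ∨ arg = "sdist" then (false, oc, rc, acc ++ [arg])
  else (cb, oc, rc, acc ++ [arg])

def filter_setup_args (input_args : List String) : Bool × Bool × Bool × List String :=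
  input_args.foldl pvStepA (true, false, false, [])

-- ===== PORT B =====
def filter_setup_args_alt (input_args : List String) : Bool × Bool × Bool × List String :=
  let rerun_cmake := input_args.contains "rerun-cmake"
  let only_cmake := input_args.contains "only-cmake"
  let cmake_and_build :=
    !(input_args.any (fun a => a = "clean" ∨ a = "egg_info" ∨ a = "sdist"))
  let filter_args_list :=
    input_args.filter (fun a => ¬ (a = "rerun-cmake" ∨ a = "only-cmake"))
  (cmake_and_build, only_cmake, rerun_cmake, filter_args_list)

-- ===== PRECONDITION & SPEC =====
def Spec_filter_setup_args (input_args : List String) (out : Bool × Bool × Bool × List String) : Prop := out = filter_setup_args_alt input_args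
instance (input_args : List String) (out : Bool × Bool × Bool × List String) : Decidable (Spec_filter_setup_args input_args out) := by unfold Spec_filter_setup_args; infer_instance

-- ===== CLAIM (what is proved, stated in full; the proofs are below) =====
def Claim_equal_filter_setup_args : Prop := ∀ (input_args : List String), Dom_filter_setup_args input_args → Spec_filter_setup_args input_args (filter_setup_args input_args)

-- ===== LEMMAS AND PROOFS =====
theorem pvFoldA_char (xs : List String) : ∀ (cb oc rc : Bool) (acc : List String),
    xs.foldl pvStepA (cb, oc, rc, acc) =
      (cb && !(xs.any (fun a => a = "clean" ∨ a = "egg_info" ∨ a = "sdist")),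
       oc || xs.contains "only-cmake",
       rc || xs.contains "rerun-cmake",
       acc ++ xs.filter (fun a => ¬ (a = "rerun-cmake" ∨ a = "only-cmake"))) := by
  induction xs with
  | nil => intro cb oc rc acc; simp
  | cons x xs ih =>
    intro cb oc rc acc
    simp only [List.foldl_cons, pvStepA]
    by_cases h1 : x = "rerun-cmake"
    · simp [h1, ih, eq_comm]
    · by_cases h2 : x = "only-cmake"
      · simp [h2, ih, eq_comm]
      · by_cases h3 : x = "clean" ∨ x = "egg_info" ∨ x = "sdist"
        · rcases h3 with h | h | h <;> simp [h, ih, eq_comm]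
        · push Not at h3
          obtain ⟨hc, he, hs⟩ := h3
          simp [h1, h2, hc, he, hs, ih, eq_comm]

-- ===== VERDICT (by name: the statement is the Claim_ definition above) =====
theorem filter_setup_args_spec : Claim_equal_filter_setup_args := by
  intro input_args _
  unfold Spec_filter_setup_args filter_setup_args filter_setup_args_alt
  simp [pvFoldA_char]
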